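-- pv_equiv track=rewrite | github.com/ihcsof/STONKSpp | mosaik_sim/PlotterAggregated.py | calculate_latencies
-- ===== SOURCE A (Python) =====
-- def calculate_latencies(numbers):
--     latencies = [numbers[0]]  # Start with the first value as the initial latency
--     for i in range(1, len(numbers)):
--         if numbers[i] == numbers[i - 1]:
--             # If the numbers are the same, use the previous latency
--             latency = latencies[-1]
--         else:
--             # Otherwise, compute the difference as the latency
--             latency = numbers[i] - numbers[i - 1]
--         latencies.append(latency)
--     return latencies
-- ===== SOURCE B (Python) =====
-- from itertools import groupby
--
-- def calculate_latencies(numbers):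
--     prev = numbers[0]  # IndexError on empty input, same as the original
--     out = []
--     first = True
--     for value, run in groupby(numbers):
--         n = sum(1 for _ in run)
--         out.extend([value if first else value - prev] * n)
--         prev = value
--         first = False
--     return out
-- ===== Notes on version B (the rewrite author's own statement) =====
-- stated objective: alternative
-- what changed: B groups the input into maximal runs of equal values with itertools.groupby and emits one latency per run (numbers[0] for the first run, value - previous run's value afterwards) repeated run-length times, keeping only the previous run's value instead of the whole latency list A maintains.
import Mathlib
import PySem

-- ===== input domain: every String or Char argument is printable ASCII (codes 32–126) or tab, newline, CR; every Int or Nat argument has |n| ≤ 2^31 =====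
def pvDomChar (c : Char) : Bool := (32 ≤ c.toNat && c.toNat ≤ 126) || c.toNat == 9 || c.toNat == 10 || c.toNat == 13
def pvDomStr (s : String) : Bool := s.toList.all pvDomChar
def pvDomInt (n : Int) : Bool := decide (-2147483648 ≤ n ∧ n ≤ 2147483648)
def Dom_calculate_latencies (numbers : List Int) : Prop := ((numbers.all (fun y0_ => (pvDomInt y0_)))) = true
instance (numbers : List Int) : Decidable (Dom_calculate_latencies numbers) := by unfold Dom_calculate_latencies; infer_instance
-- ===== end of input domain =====

-- B replaces A's per-element latency list with a run-based pass (maximal runs of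
-- equal values, one latency per run, repeated run-length times); same asymptotic cost.

-- ===== PORT A =====
def calculate_latencies (numbers : List Int) : List Int :=
  (PySem.List.pyRange 1 (numbers.length : Int) 1).foldl
    (fun latencies i =>
      latencies ++
        [if PySem.List.pyGetD numbers i 0 = PySem.List.pyGetD numbers (i - 1) 0 then
           PySem.List.pyGetD latencies (-1) 0
         else
           PySem.List.pyGetD numbers i 0 - PySem.List.pyGetD numbers (i - 1) 0])
    [PySem.List.pyGetD numbers 0 0]

-- ===== PORT B =====
-- takeRun v xs = (length of the maximal prefix of xs equal to v, the remainder):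
-- the run-measuring step of the groupby loop in Source B
def takeRun (v : Int) : List Int → Nat × List Int
  | [] => (0, [])
  | x :: xs => if x = v then ((takeRun v xs).1 + 1, (takeRun v xs).2) else (0, x :: xs)

theorem takeRun_snd_length (v : Int) (l : List Int) : (takeRun v l).2.length ≤ l.length := by
  induction l with
  | nil => simp [takeRun]
  | cons x xs ih =>
    simp only [takeRun]
    split
    · exact Nat.le_succ_of_le ih
    · simp

-- the groupby loop after the first run: each run of value x after previous value
-- prev contributes (x - prev) repeated run-length times
def emitRuns (prev : Int) : List Int → List Int
  | [] => []
  | x :: xs =>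
    List.replicate ((takeRun x xs).1 + 1) (x - prev) ++ emitRuns x (takeRun x xs).2
termination_by l => l.length
decreasing_by
  simpa using Nat.lt_succ_of_le (takeRun_snd_length x xs)

-- first run emits numbers[0] itself; [] raises in Source B (outside Pre_)
def calculate_latencies_alt (numbers : List Int) : List Int :=
  match numbers with
  | [] => []
  | x :: xs =>
    List.replicate ((takeRun x xs).1 + 1) x ++ emitRuns x (takeRun x xs).2

-- ===== PRECONDITION & SPEC =====
-- A raises IndexError on the empty list (numbers[0]); B raises there too.
def Pre_calculate_latencies (numbers : List Int) : Prop := numbers ≠ []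
instance (numbers : List Int) : Decidable (Pre_calculate_latencies numbers) := by
  unfold Pre_calculate_latencies; infer_instance
def pvWitness_calculate_latencies : List Int := ([3, 3, 7, 7, 2] : List Int)

def Spec_calculate_latencies (numbers : List Int) (out : List Int) : Prop :=
  out = calculate_latencies_alt numbers
instance (numbers : List Int) (out : List Int) : Decidable (Spec_calculate_latencies numbers out) := by
  unfold Spec_calculate_latencies; infer_instance

-- ===== CLAIM (what is proved, stated in full; the proofs are below) =====
def Claim_equal_calculate_latencies : Prop :=
  ∀ (numbers : List Int), Dom_calculate_latencies numbers →
    Pre_calculate_latencies numbers →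
    Spec_calculate_latencies numbers (calculate_latencies numbers)

-- ===== LEMMAS AND PROOFS =====

-- A's loop body, named for the proofs
def aStep (nums : List Int) (latencies : List Int) (i : Int) : List Int :=
  latencies ++
    [if PySem.List.pyGetD nums i 0 = PySem.List.pyGetD nums (i - 1) 0 then
       PySem.List.pyGetD latencies (-1) 0
     else
       PySem.List.pyGetD nums i 0 - PySem.List.pyGetD nums (i - 1) 0]

theorem calc_eq (numbers : List Int) :
    calculate_latencies numbers =
      (PySem.List.pyRange 1 (numbers.length : Int) 1).foldl (aStep numbers)
        [PySem.List.pyGetD numbers 0 0] := rfl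

theorem getD_last_cons (l : List Int) : ∀ (a d : Int),
    (a :: l).getLast?.getD d = l.getLast?.getD a := by
  induction l with
  | nil => intro a d; simp
  | cons b t ih =>
    intro a d
    rw [List.getLast?_cons_cons, ih b d, ih b a]

-- canonical per-element recursion: prev = previous number, last = previous latency
def specGo (prev last : Int) : List Int → List Int
  | [] => []
  | y :: ys =>
    let l := if y = prev then last else y - prev
    l :: specGo y l ys

theorem specGo_run (xs : List Int) : ∀ (x lat : Int),
    specGo x lat xs = List.replicate (takeRun x xs).1 lat ++ emitRuns x (takeRun x xs).2 := by
  induction xs with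
  | nil => intro x lat; simp [specGo, takeRun, emitRuns]
  | cons y ys ih =>
    intro x lat
    by_cases h : y = x
    · subst h
      simp only [specGo, takeRun, ite_true, List.replicate_succ, List.cons_append]
      rw [ih y lat]
    · simp only [specGo, takeRun, if_neg h, List.replicate_zero, List.nil_append,
        emitRuns, List.replicate_succ, List.cons_append]
      rw [ih y (y - x)]

theorem alt_eq_specGo (x : Int) (xs : List Int) :
    calculate_latencies_alt (x :: xs) = x :: specGo x x xs := by
  simp only [calculate_latencies_alt]
  rw [specGo_run xs x x, List.replicate_succ, List.cons_append]

theorem specGo_snoc (ys : List Int) : ∀ (prev last y : Int),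
    specGo prev last (ys ++ [y]) = specGo prev last ys ++
      [if y = ys.getLast?.getD prev then (specGo prev last ys).getLast?.getD last
       else y - ys.getLast?.getD prev] := by
  induction ys with
  | nil => intro prev last y; simp [specGo]
  | cons z zs ih =>
    intro prev last y
    simp only [List.cons_append, specGo]
    rw [ih]
    rw [getD_last_cons zs z prev, getD_last_cons (specGo z (if z = prev then last else z - prev) zs)]

theorem A_fold_length (numbers : List Int) (r : List Int) : ∀ (init : List Int),
    (r.foldl (aStep numbers) init).length = init.length + r.length := by
  induction r with
  | nil => intro init; simp
  | cons i r ih =>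
    intro init
    simp only [List.foldl_cons]
    rw [ih]
    simp [aStep]
    omega

theorem calc_length (numbers : List Int) (h : numbers ≠ []) :
    (calculate_latencies numbers).length = numbers.length := by
  rw [calc_eq, A_fold_length, PySem.List.length_pyRange_one]
  have : 1 ≤ numbers.length := List.length_pos_iff.mpr h
  simp only [List.length_cons, List.length_nil]
  omega

theorem calc_ne_nil (numbers : List Int) (h : numbers ≠ []) :
    calculate_latencies numbers ≠ [] := by
  intro hc
  have h1 := calc_length numbers h
  rw [hc] at h1
  have : 0 < numbers.length := List.length_pos_iff.mpr h
  simp at h1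
  omega

theorem A_snoc (numbers : List Int) (y : Int) (h : numbers ≠ []) :
    calculate_latencies (numbers ++ [y]) = calculate_latencies numbers ++
      [if y = numbers.getLast?.getD 0 then (calculate_latencies numbers).getLast?.getD 0
       else y - numbers.getLast?.getD 0] := by
  have hn : 1 ≤ numbers.length := List.length_pos_iff.mpr h
  rw [calc_eq, calc_eq]
  have hlen : ((numbers ++ [y]).length : Int) = (numbers.length : Int) + 1 := by
    simp
  rw [hlen, PySem.List.pyRange_one_succ_right (by exact_mod_cast hn), List.foldl_append]
  have hget0 : PySem.List.pyGetD (numbers ++ [y]) 0 0 = PySem.List.pyGetD numbers 0 0 := by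
    obtain ⟨x, xs, rfl⟩ := List.exists_cons_of_ne_nil h
    simp [PySem.List.pyGetD_zero_cons]
  have hidx : ∀ (i : Int), 0 ≤ i → i < (numbers.length : Int) →
      PySem.List.pyGetD (numbers ++ [y]) i 0 = PySem.List.pyGetD numbers i 0 := by
    intro i h0 h1
    rw [PySem.List.pyGetD_eq_getElem (numbers ++ [y]) 0 h0
          (by simp only [List.length_append, List.length_cons, List.length_nil]; omega),
        PySem.List.pyGetD_eq_getElem numbers 0 h0 h1,
        List.getElem_append_left (by omega)]
  have hcongr : ∀ (acc : List Int), ∀ i ∈ PySem.List.pyRange 1 (numbers.length : Int) 1,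
      aStep (numbers ++ [y]) acc i = aStep numbers acc i := by
    intro acc i hi
    rw [PySem.List.mem_pyRange_one] at hi
    unfold aStep
    rw [hidx i (by omega) (by omega), hidx (i - 1) (by omega) (by omega)]
  rw [hget0, PySem.List.foldl_congr_mem _ _ _ _ hcongr]
  have hlatne : ((PySem.List.pyRange 1 (numbers.length : Int) 1).foldl (aStep numbers)
      [PySem.List.pyGetD numbers 0 0]) ≠ [] := by
    rw [← calc_eq]
    exact calc_ne_nil numbers h
  have hA : PySem.List.pyGetD (numbers ++ [y]) (numbers.length : Int) 0 = y := by
    rw [PySem.List.pyGetD_eq_getElem (numbers ++ [y]) 0 (by omega)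
          (by simp only [List.length_append, List.length_cons, List.length_nil]; omega)]
    simp
  have hB : PySem.List.pyGetD (numbers ++ [y]) ((numbers.length : Int) - 1) 0 =
      numbers.getLast?.getD 0 := by
    rw [PySem.List.pyGetD_eq_getElem (numbers ++ [y]) 0 (by omega)
          (by simp only [List.length_append, List.length_cons, List.length_nil]; omega),
        List.getElem_append_left (by omega)]
    rw [List.getLast?_eq_getElem?]
    rw [List.getElem?_eq_getElem (by omega)]
    simp only [Option.getD_some]
    congr 1
    omega
  have hC : PySem.List.pyGetD ((PySem.List.pyRange 1 (numbers.length : Int) 1).foldl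
        (aStep numbers) [PySem.List.pyGetD numbers 0 0]) (-1) 0 =
      ((PySem.List.pyRange 1 (numbers.length : Int) 1).foldl (aStep numbers)
        [PySem.List.pyGetD numbers 0 0]).getLast?.getD 0 := by
    have hsome := List.getLast?_eq_some_getLast (h := hlatne)
    rw [PySem.List.pyGetD_neg_one _ _ hlatne, hsome]
    simp
  simp only [List.foldl_cons, List.foldl_nil, aStep, hA, hB, hC]

theorem alt_snoc (numbers : List Int) (y : Int) (h : numbers ≠ []) :
    calculate_latencies_alt (numbers ++ [y]) = calculate_latencies_alt numbers ++
      [if y = numbers.getLast?.getD 0 then (calculate_latencies_alt numbers).getLast?.getD 0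
       else y - numbers.getLast?.getD 0] := by
  obtain ⟨x, xs, rfl⟩ := List.exists_cons_of_ne_nil h
  rw [List.cons_append, alt_eq_specGo, alt_eq_specGo, specGo_snoc]
  rw [getD_last_cons xs x 0, getD_last_cons (specGo x x xs) x 0]
  simp

theorem A_base (y : Int) : calculate_latencies [y] = calculate_latencies_alt [y] := by
  rw [calc_eq]
  rw [show ((List.length [y] : Nat) : Int) = 1 by simp,
      PySem.List.pyRange_one_eq_nil le_rfl]
  simp [calculate_latencies_alt, takeRun, emitRuns, PySem.List.pyGetD_zero_cons]

theorem A_eq_alt (numbers : List Int) (h : numbers ≠ []) :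
    calculate_latencies numbers = calculate_latencies_alt numbers := by
  induction numbers using List.reverseRecOn with
  | nil => exact absurd rfl h
  | append_singleton ys y ih =>
    by_cases hy : ys = []
    · subst hy
      simpa using A_base y
    · rw [A_snoc ys y hy, alt_snoc ys y hy, ih hy]

-- ===== VERDICT (by name: the statement is the Claim_ definition above) =====
theorem calculate_latencies_spec : Claim_equal_calculate_latencies := by
  intro numbers _ hpre
  unfold Spec_calculate_latencies
  exact A_eq_alt numbers hpre
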